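-- pv_equiv track=rewrite | github.com/gwahak/boardgame | quod0.py | count4gon
-- ===== SOURCE A (Python) =====
-- pan = [[7,0,0,0,0,0,0,0,0,0,7],[0,0,0,0,0,0,0,0,0,0,0],[0,0,0,0,0,0,0,0,0,0,0],[0,0,0,0,0,0,0,0,0,0,0],[0,0,0,0,0,0,0,0,0,0,0],[0,0,0,0,0,0,0,0,0,0,0],[0,0,0,0,0,0,0,0,0,0,0],[0,0,0,0,0,0,0,0,0,0,0],[0,0,0,0,0,0,0,0,0,0,0],[0,0,0,0,0,0,0,0,0,0,0],[7,0,0,0,0,0,0,0,0,0,7]]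
--
-- def count4gon(n):
--     count=0
--     for gg in range(1,11):
--         for hh in range(gg):
--             for ii in range(11-gg):
--                 for jj in range(11-gg):
--                     if pan[ii][jj+hh]==n and pan[ii+hh][jj+gg]==n and pan[ii+gg-hh][jj]==n and pan[ii+gg][jj+gg-hh]==n:
--                         count+=1
--     return count
-- ===== SOURCE B (Python) =====
-- pan = [[7,0,0,0,0,0,0,0,0,0,7],[0,0,0,0,0,0,0,0,0,0,0],[0,0,0,0,0,0,0,0,0,0,0],[0,0,0,0,0,0,0,0,0,0,0],[0,0,0,0,0,0,0,0,0,0,0],[0,0,0,0,0,0,0,0,0,0,0],[0,0,0,0,0,0,0,0,0,0,0],[0,0,0,0,0,0,0,0,0,0,0],[0,0,0,0,0,0,0,0,0,0,0],[0,0,0,0,0,0,0,0,0,0,0],[7,0,0,0,0,0,0,0,0,0,7]]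
--
-- def count4gon(n):
--     # Pair-rotation algorithm: collect the matching cells, then for every ordered
--     # pair of distinct matching points treat it as a directed square edge and check
--     # the two corners obtained by rotating the edge 90 degrees; every square is
--     # found once per edge (4 times), so divide by 4.
--     pts = [(r, c) for r in range(11) for c in range(11) if pan[r][c] == n]
--     def ins(r, c):
--         return 0 <= r < 11 and 0 <= c < 11 and pan[r][c] == n
--     total = 0
--     for (r1, c1) in pts:
--         sub = 0
--         for (r2, c2) in pts:
--             if (r1, c1) != (r2, c2):
--                 dr, dc = r2 - r1, c2 - c1
--                 if ins(r1 + dc, c1 - dr) and ins(r2 + dc, c2 - dr):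
--                     sub += 1
--         total += sub
--     return total // 4
-- ===== Notes on version B (the rewrite author's own statement) =====
-- stated objective: alternative
-- what changed: A enumerates every square placement by (size, tilt, position) and tests its four corners; B uses the classic pair-rotation square-counting algorithm: it collects the matching cells once, counts ordered pairs of distinct points whose 90-degree-rotated edge completes a square of matching cells, and divides by 4 since each square is found once per edge.
import Mathlib
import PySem

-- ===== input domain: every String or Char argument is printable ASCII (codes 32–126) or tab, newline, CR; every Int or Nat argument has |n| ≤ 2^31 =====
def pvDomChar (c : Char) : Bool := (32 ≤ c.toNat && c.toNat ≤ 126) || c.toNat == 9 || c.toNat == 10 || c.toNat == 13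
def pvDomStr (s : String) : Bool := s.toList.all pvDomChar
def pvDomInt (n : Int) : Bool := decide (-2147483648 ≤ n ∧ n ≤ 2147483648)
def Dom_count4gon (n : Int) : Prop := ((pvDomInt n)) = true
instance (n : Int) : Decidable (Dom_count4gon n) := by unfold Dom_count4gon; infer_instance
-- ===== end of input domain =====

-- B replaces A's enumeration of square placements by the pair-rotation counting algorithm
-- (each ordered pair of matching cells tried as a directed edge, result divided by 4);
-- objective: alternative algorithm, same exact counts.

-- ===== PORT A =====
def pan : List (List Int) :=
  [[7,0,0,0,0,0,0,0,0,0,7],[0,0,0,0,0,0,0,0,0,0,0],[0,0,0,0,0,0,0,0,0,0,0],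
   [0,0,0,0,0,0,0,0,0,0,0],[0,0,0,0,0,0,0,0,0,0,0],[0,0,0,0,0,0,0,0,0,0,0],
   [0,0,0,0,0,0,0,0,0,0,0],[0,0,0,0,0,0,0,0,0,0,0],[0,0,0,0,0,0,0,0,0,0,0],
   [0,0,0,0,0,0,0,0,0,0,0],[7,0,0,0,0,0,0,0,0,0,7]]

-- pan[i][j]; exact on every index both programs use (all are in range, so the default is never taken)
def panGet (i j : Int) : Int := (PySem.List.pyGet? ((PySem.List.pyGet? pan i).getD []) j).getD 0

def count4gon (n : Int) : Int :=
  (PySem.List.pyRange 1 11 1).foldl (fun count gg =>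
    (PySem.List.pyRange 0 gg 1).foldl (fun count hh =>
      (PySem.List.pyRange 0 (11 - gg) 1).foldl (fun count ii =>
        (PySem.List.pyRange 0 (11 - gg) 1).foldl (fun count jj =>
          if panGet ii (jj + hh) == n && panGet (ii + hh) (jj + gg) == n &&
             panGet (ii + gg - hh) jj == n && panGet (ii + gg) (jj + gg - hh) == n
          then count + 1 else count) count) count) count) 0

-- ===== PORT B =====
-- the 'ins' bounds-checked membership test of Source B
def pvIns (n r c : Int) : Bool :=
  (0 ≤ r && r < 11) && (0 ≤ c && c < 11) && panGet r c == n

def count4gon_alt (n : Int) : Int :=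
  let pts : List (Int × Int) :=
    (PySem.List.pyRange 0 11 1).flatMap (fun r =>
      ((PySem.List.pyRange 0 11 1).filter (fun c => panGet r c == n)).map (fun c => (r, c)))
  let total :=
    pts.foldl (fun total p1 =>
      total +
        pts.foldl (fun sub p2 =>
          if p1 ≠ p2 then
            let dr := p2.1 - p1.1
            let dc := p2.2 - p1.2
            if pvIns n (p1.1 + dc) (p1.2 - dr) && pvIns n (p2.1 + dc) (p2.2 - dr)
            then sub + 1 else sub
          else sub) 0) 0
  PySem.Int.floordiv total 4

-- ===== PRECONDITION & SPEC =====
def Spec_count4gon (n : Int) (out : Int) : Prop := out = count4gon_alt n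
instance (n : Int) (out : Int) : Decidable (Spec_count4gon n out) := by unfold Spec_count4gon; infer_instance

-- ===== CLAIM =====
def Claim_equal_count4gon : Prop := ∀ (n : Int), Dom_count4gon n → Spec_count4gon n (count4gon n)

-- ===== LEMMAS AND PROOFS =====

theorem foldl_eq_of_id {α β : Type} (l : List β) (f : α → β → α) (h : ∀ a x, x ∈ l → f a x = a)
    (acc : α) : l.foldl f acc = acc := by
  induction l generalizing acc with
  | nil => rfl
  | cons y ys ih =>
    simp only [List.foldl_cons, h acc y (by simp)]
    exact ih (fun a x hx => h a x (List.mem_cons_of_mem y hx)) acc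

theorem pyGet?_nil_int (j : Int) : PySem.List.pyGet? ([] : List Int) j = none := by
  cases hx : PySem.List.pyGet? ([] : List Int) j with
  | none => rfl
  | some x => exact absurd (PySem.List.mem_of_pyGet?_eq_some [] hx) (by simp)

theorem panGet_mem (i j : Int) : panGet i j = 0 ∨ panGet i j = 7 := by
  have hflat : ∀ x ∈ pan.flatten, x = 0 ∨ x = 7 := by decide
  unfold panGet
  cases hr : PySem.List.pyGet? pan i with
  | none => simp only [Option.getD_none]; rw [pyGet?_nil_int]; left; rfl
  | some row =>
    have hrow : row ∈ pan := PySem.List.mem_of_pyGet?_eq_some pan hr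
    simp only [Option.getD_some]
    cases hx : PySem.List.pyGet? row j with
    | none => left; rfl
    | some x =>
      simpa using hflat x (List.mem_flatten.mpr ⟨row, hrow, PySem.List.mem_of_pyGet?_eq_some row hx⟩)

theorem panGet_beq_false (i j n : Int) (h0 : n ≠ 0) (h7 : n ≠ 7) : (panGet i j == n) = false := by
  rcases panGet_mem i j with h | h <;> simp [h, Ne.symm h0, Ne.symm h7]

theorem count4gon_eq_zero (n : Int) (h0 : n ≠ 0) (h7 : n ≠ 7) : count4gon n = 0 := by
  unfold count4gon
  refine foldl_eq_of_id _ _ (fun a gg _ => ?_) 0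
  refine foldl_eq_of_id _ _ (fun a hh _ => ?_) a
  refine foldl_eq_of_id _ _ (fun a ii _ => ?_) a
  refine foldl_eq_of_id _ _ (fun a jj _ => ?_) a
  simp [panGet_beq_false _ _ n h0 h7]

theorem count4gon_alt_eq_zero (n : Int) (h0 : n ≠ 0) (h7 : n ≠ 7) : count4gon_alt n = 0 := by
  unfold count4gon_alt
  have hS : ((PySem.List.pyRange 0 11 1).flatMap (fun r =>
      ((PySem.List.pyRange 0 11 1).filter (fun c => panGet r c == n)).map (fun c => (r, c)))) = [] := by
    simp [List.flatMap_eq_nil_iff, panGet_beq_false _ _ n h0 h7]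
  rw [hS]
  simp only [List.foldl_nil]
  decide

-- ===== VERDICT =====
set_option maxRecDepth 1000000 in
set_option maxHeartbeats 16000000 in
theorem count4gon_spec : Claim_equal_count4gon := by
  intro n _
  unfold Spec_count4gon
  by_cases h7 : n = 7
  · subst h7; decide
  by_cases h0 : n = 0
  · subst h0; decide
  · rw [count4gon_eq_zero n h0 h7, count4gon_alt_eq_zero n h0 h7]
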